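-- pv_equiv track=rewrite | github.com/friaes/FP | Projeto1/Projeto1_Rodrigo_Friaes.py | corrigir_doc
-- ===== SOURCE A (Python) =====
-- def corrigir_palavra(s):
--     i = 0
--     while i < len(s)-1:
--         if s[i] == chr(ord(s[i+1]) - ord('A') + ord('a')):    # se verificar um par mínuscula/maíscula da mesma letra
--             s = s[:i] + s[i+2:]                               # remove o par e
--             i = 0                                             # recomeça o ciclo
--         elif s[i] == chr(ord(s[i+1]) - ord('a') + ord('A')):  # par maíscula/mínuscula da mesma letra
--             s = s[:i] + s[i+2:]
--             i = 0
--         else: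
--             i += 1
--     return s
--
-- def corrigir_doc(s):
--     if not(type(s) == str and len(s) > 0):
--         raise ValueError('corrigir_doc: argumento invalido')
--     for c in s:
--         if not ('a' <= c <= 'z' or 'A' <= c <= 'Z' or c == ' '):
--             raise ValueError('corrigir_doc: argumento invalido')
--     s = corrigir_palavra(s)
--     s = s.split()
--     res = []                    # 'frase resultante'
--     encontrada = []             # "palavras ordenadas" encontradas
--     for n in range(len(s)):
--         p_ordenada = sorted(s[n].lower())
--         if p_ordenada not in encontrada:
--             encontrada += [p_ordenada]
--             res.append(s[n])    # se uma certa "palavra ordenada" já tiver sido encontrada,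
--         elif s[n].lower() in " ".join(res).lower():  # verifica se esta 'palavra'
--             res.append(s[n])    # já foi adicionada à 'frase resultante',pois caso já tiver sido adicionada,
--     return " ".join(res)        # esta 'palavra' não é um anagrama duma palavra anterior
-- ===== SOURCE B (Python) =====
-- def corrigir_doc(s):
--     if not(type(s) == str and len(s) > 0):
--         raise ValueError('corrigir_doc: argumento invalido')
--     for c in s:
--         if not ('a' <= c <= 'z' or 'A' <= c <= 'Z' or c == ' '):
--             raise ValueError('corrigir_doc: argumento invalido')
--     # stack-based elimination of adjacent same-letter opposite-case pairs (O(n))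
--     stack = []
--     for c in s:
--         if stack and stack[-1] != c and stack[-1] == c.swapcase():
--             stack.pop()
--         else:
--             stack.append(c)
--     res = []
--     seen = set()           # sorted lowercase keys already met
--     joined_l = ""          # == " ".join(res).lower(), maintained incrementally
--     for w in "".join(stack).split():
--         wl = w.lower()
--         key = "".join(sorted(wl))
--         if key not in seen:
--             seen.add(key)
--         elif wl not in joined_l:
--             continue
--         joined_l = wl if not res else joined_l + " " + wl
--         res.append(w)
--     return " ".join(res)
-- ===== Notes on version B (the rewrite author's own statement) =====
-- stated objective: faster
-- what changed: Replaces the restart-from-zero quadratic pair-removal loop with a single-pass stack elimination, and replaces the list membership test and the full re-join-and-lower of the result on every dedup iteration with a set of seen sorted keys and an incrementally maintained lowered join.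
import Mathlib
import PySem

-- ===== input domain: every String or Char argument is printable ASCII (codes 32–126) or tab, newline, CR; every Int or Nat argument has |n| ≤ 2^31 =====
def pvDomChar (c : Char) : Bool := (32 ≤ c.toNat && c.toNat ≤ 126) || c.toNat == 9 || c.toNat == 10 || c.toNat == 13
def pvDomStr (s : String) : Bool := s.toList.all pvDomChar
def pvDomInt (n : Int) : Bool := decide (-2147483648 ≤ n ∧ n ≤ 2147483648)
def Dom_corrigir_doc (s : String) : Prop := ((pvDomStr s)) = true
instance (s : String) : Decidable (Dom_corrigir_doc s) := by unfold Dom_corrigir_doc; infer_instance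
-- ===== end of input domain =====

-- B replaces A's quadratic restart-from-zero pair-removal loop by a one-pass stack
-- elimination and A's list-membership/re-joined dedup loop by a set of seen keys with
-- an incrementally maintained lowered join (objective: faster; return value only).

-- ===== PORT A =====

-- char validity test shared by both Pythons' input validation
def pvValidChar (c : Char) : Bool := ('a' ≤ c && c ≤ 'z') || ('A' ≤ c && c ≤ 'Z') || c == ' '

-- A's corrigir_palavra: while-loop with index i, restarts at 0 after each removal.
-- chr(ord(d) - ord('A') + ord('a')) is ported as Char.ofNat (d.toNat + 97 - 65) (the
-- same integer, associated so Nat subtraction never clamps on the validated chars).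
def pvCorrigirPalavra (s : List Char) (i : Nat) : List Char :=
  if h : i + 1 < s.length then
    if s[i]'(by omega) == Char.ofNat ((s[i+1]'h).toNat + 97 - 65) then
      pvCorrigirPalavra (s.take i ++ s.drop (i+2)) 0
    else if s[i]'(by omega) == Char.ofNat ((s[i+1]'h).toNat + 65 - 97) then
      pvCorrigirPalavra (s.take i ++ s.drop (i+2)) 0
    else
      pvCorrigirPalavra s (i+1)
  else s
termination_by (s.length, s.length - i)
decreasing_by
  · apply Prod.Lex.left; simp; omega
  · apply Prod.Lex.left; simp; omega
  · apply Prod.Lex.right; omega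

-- A's dedup loop: for n in range(len(ws)) with res/encontrada lists
def pvDedupA (ws : List (List Char)) : List (List Char) × List (List Char) :=
  (PySem.List.pyRange 0 (PySem.List.len ws)).foldl
    (fun st n =>
      let w := PySem.List.pyGetD ws n []
      let p := PySem.List.sorted (PySem.Chars.lower w) (fun c => c) false
      if p ∈ st.2 then
        if PySem.Chars.isIn (PySem.Chars.lower w)
            (PySem.Chars.lower (PySem.Chars.join [' '] st.1)) then
          (st.1 ++ [w], st.2)
        else st
      else (st.1 ++ [w], st.2 ++ [p]))
    ([], [])

def corrigir_doc (s : String) : String :=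
  let cs := s.toList
  if 0 < cs.length && cs.all pvValidChar then
    String.ofList (PySem.Chars.join [' ']
      (pvDedupA (PySem.Chars.split₀ (pvCorrigirPalavra cs 0))).1)
  else ""    -- Python raises ValueError here; excluded by Pre_

-- ===== PORT B =====

-- hand port of str.swapcase, exact on the validated ASCII letters/space
def pvSwapcase (c : Char) : Char :=
  if 'a' ≤ c && c ≤ 'z' then Char.ofNat (c.toNat - 32)
  else if 'A' ≤ c && c ≤ 'Z' then Char.ofNat (c.toNat + 32)
  else c

-- 'stack and stack[-1] != c and stack[-1] == c.swapcase()'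
def pvPair (t c : Char) : Bool := t != c && t == pvSwapcase c

-- one step of B's stack loop (cons at the head = Python append at the end)
def pvStep (st : List Char) (c : Char) : List Char :=
  match st with
  | [] => [c]
  | t :: r => if pvPair t c then r else c :: t :: r

-- B's dedup loop: state (res, seen set, lowered join of res)
def pvDedupB (ws : List (List Char)) :
    List (List Char) × PySem.Set String × List Char :=
  ws.foldl
    (fun st w =>
      let wl := PySem.Chars.lower w
      let key := String.ofList (PySem.List.sorted wl (fun c => c) false)
      let seen' := if key ∈ st.2.1 then st.2.1 else PySem.Set.add st.2.1 key
      if key ∈ st.2.1 && !(PySem.Chars.isIn wl st.2.2) then st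
      else (st.1 ++ [w], seen', if st.1.isEmpty then wl else st.2.2 ++ [' '] ++ wl))
    ([], PySem.Set.ofList [], [])

def corrigir_doc_alt (s : String) : String :=
  let cs := s.toList
  if 0 < cs.length && cs.all pvValidChar then
    String.ofList (PySem.Chars.join [' ']
      (pvDedupB (PySem.Chars.split₀ (cs.foldl pvStep []).reverse)).1)
  else ""    -- Source B raises ValueError here too

-- ===== PRECONDITION & SPEC =====
-- Pre_ excludes exactly the inputs on which both Pythons raise ValueError:
-- the empty string and strings with a character other than a letter or a space.
def Pre_corrigir_doc (s : String) : Prop :=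
  s.toList ≠ [] ∧ s.toList.all (fun c =>
    (97 ≤ c.toNat && c.toNat ≤ 122) || (65 ≤ c.toNat && c.toNat ≤ 90) || c.toNat == 32) = true
instance (s : String) : Decidable (Pre_corrigir_doc s) := by
  unfold Pre_corrigir_doc; infer_instance
def pvWitness_corrigir_doc : String := "aA bc Cb"

def Spec_corrigir_doc (s : String) (out : String) : Prop := out = corrigir_doc_alt s
instance (s : String) (out : String) : Decidable (Spec_corrigir_doc s out) := by
  unfold Spec_corrigir_doc; infer_instance

-- ===== CLAIM (what is proved, stated in full; the proofs are below) =====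
def Claim_equal_corrigir_doc : Prop :=
  ∀ (s : String), Dom_corrigir_doc s → Pre_corrigir_doc s →
    Spec_corrigir_doc s (corrigir_doc s)

-- ===== LEMMAS AND PROOFS =====

theorem pv_ofNat_toNat {n : Nat} (h : n < 55296) : (Char.ofNat n).toNat = n := by
  simp [Char.ofNat, Nat.isValidChar, h, Char.ofNatAux, Char.toNat]

theorem pv_eq_iff (c d : Char) : c = d ↔ c.toNat = d.toNat :=
  ⟨fun h => by rw [h], fun h => Char.ext (UInt32.toNat_inj.mp h)⟩

theorem pv_le_iff (c d : Char) : c ≤ d ↔ c.toNat ≤ d.toNat := by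
  rw [Char.le_def]; exact UInt32.le_iff_toNat_le

theorem pv_swap_toNat (c : Char) : (pvSwapcase c).toNat =
    if 97 ≤ c.toNat ∧ c.toNat ≤ 122 then c.toNat - 32
    else if 65 ≤ c.toNat ∧ c.toNat ≤ 90 then c.toNat + 32
    else c.toNat := by
  have h1 : ('a' ≤ c && c ≤ 'z') = decide (97 ≤ c.toNat ∧ c.toNat ≤ 122) := by
    simp [pv_le_iff]
  have h2 : ('A' ≤ c && c ≤ 'Z') = decide (65 ≤ c.toNat ∧ c.toNat ≤ 90) := by
    simp [pv_le_iff]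
  unfold pvSwapcase
  rw [h1, h2]
  split_ifs with ha hb <;> simp_all <;> rw [pv_ofNat_toNat (by omega)]

theorem pv_swap_invol (c : Char) : pvSwapcase (pvSwapcase c) = c := by
  rw [pv_eq_iff, pv_swap_toNat, pv_swap_toNat]
  have := pv_swap_toNat c
  split_ifs <;> omega

theorem pv_pair_iff (t c : Char) : pvPair t c = true ↔ t.toNat ≠ c.toNat ∧ t.toNat = (pvSwapcase c).toNat := by
  simp only [pvPair, Bool.and_eq_true, bne_iff_ne, ne_eq, beq_iff_eq]
  rw [pv_eq_iff (c := t) (d := c), pv_eq_iff (c := t) (d := pvSwapcase c)]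

theorem pv_pair_uniq {t c d : Char} (h1 : pvPair t c = true) (h2 : pvPair c d = true) : t = d := by
  rw [pv_pair_iff] at h1 h2
  have hc : c = pvSwapcase d := (pv_eq_iff _ _).mpr h2.2
  have ht : t = pvSwapcase c := (pv_eq_iff _ _).mpr h1.2
  rw [ht, hc, pv_swap_invol]

theorem pv_valid_iff (c : Char) : pvValidChar c = true ↔
    (97 ≤ c.toNat ∧ c.toNat ≤ 122) ∨ (65 ≤ c.toNat ∧ c.toNat ≤ 90) ∨ c.toNat = 32 := by
  simp [pvValidChar, pv_le_iff, pv_eq_iff]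
  tauto

theorem pv_cond_eq {c d : Char} (hc : pvValidChar c = true) (hd : pvValidChar d = true) :
    ((c == Char.ofNat (d.toNat + 97 - 65)) || (c == Char.ofNat (d.toNat + 65 - 97))) = pvPair c d := by
  rw [pv_valid_iff] at hc hd
  rw [Bool.eq_iff_iff]
  have e1 : (d.toNat + 97 - 65) < 55296 := by omega
  have e2 : (d.toNat + 65 - 97) < 55296 := by omega
  have hs := pv_swap_toNat d
  simp only [Bool.or_eq_true, beq_iff_eq, pv_eq_iff (c := c), pv_ofNat_toNat e1, pv_ofNat_toNat e2,
    pv_pair_iff, hs]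
  split_ifs <;> omega

def pvR (a b : Char) : Prop := pvPair b a = false

theorem pv_inv_step {st : List Char} (h : st.IsChain pvR) (c : Char) :
    (pvStep st c).IsChain pvR := by
  match st, h with
  | [], _ => simp [pvStep]
  | [t], _ =>
    simp only [pvStep]
    split
    · simp
    · rename_i hp
      simp_all [pvR, List.isChain_cons_cons]
  | t :: u :: r, h =>
    simp only [pvStep]
    split
    · exact (List.isChain_cons_cons.mp h).2
    · rename_i hp
      rw [List.isChain_cons_cons]
      exact ⟨by simp only [pvR]; simpa using hp, h⟩

theorem pv_inv_foldl (l : List Char) : ∀ {st : List Char}, st.IsChain pvR →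
    (l.foldl pvStep st).IsChain pvR := by
  induction l with
  | nil => intro st h; exact h
  | cons c l ih => intro st h; exact ih (pv_inv_step h c)

theorem pv_cancel {st : List Char} (h : st.IsChain pvR) {c d : Char}
    (hp : pvPair c d = true) : pvStep (pvStep st c) d = st := by
  match st, h with
  | [], _ => simp [pvStep, hp]
  | t :: r, h =>
    by_cases htc : pvPair t c = true
    · have htd : t = d := pv_pair_uniq htc hp
      subst htd
      simp only [pvStep, htc, if_pos]
      match r, h with
      | [], _ => simp
      | u :: r', h =>
        have hut : pvPair u t = false := by
          have := (List.isChain_cons_cons.mp h).1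
          simpa [pvR] using this
        simp [hut]
    · simp only [pvStep, htc, if_neg, Bool.not_eq_true] at *
      simp [hp]

theorem pv_cancel_foldl {st : List Char} (h : st.IsChain pvR) {c d : Char}
    (hp : pvPair c d = true) (r : List Char) :
    (c :: d :: r).foldl pvStep st = r.foldl pvStep st := by
  simp only [List.foldl_cons, pv_cancel h hp]

theorem pv_nf (l : List Char) : ∀ (st : List Char),
    l.IsChain (fun a b => pvPair a b = false) →
    (∀ t r c l', st = t :: r → l = c :: l' → pvPair t c = false) →
    l.foldl pvStep st = l.reverse ++ st := by
  induction l with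
  | nil => intro st _ _; simp
  | cons c l ih =>
    intro st hch hb
    have hpush : pvStep st c = c :: st := by
      match st with
      | [] => rfl
      | t :: r => simp [pvStep, hb t r c l rfl rfl]
    rw [List.foldl_cons, hpush, ih (c :: st) hch.tail ?bnd]
    · simp
    case bnd =>
      intro t r e l' het hel
      obtain ⟨rfl, rfl⟩ : t = c ∧ r = st := by
        constructor <;> injection het <;> simp_all
      subst hel
      exact (List.isChain_cons_cons.mp hch).1

theorem pv_decomp (s : List Char) (i : Nat) (h : i + 1 < s.length) :
    s = s.take i ++ (s[i]'(by omega)) :: (s[i+1]'h) :: s.drop (i+2) := by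
  conv_lhs => rw [← List.take_append_drop i s]
  rw [List.drop_eq_getElem_cons (by omega : i < s.length),
      List.drop_eq_getElem_cons (h := h)]

theorem pv_elim_mid (s : List Char) (i : Nat) (h : i + 1 < s.length)
    (hp : pvPair (s[i]'(by omega)) (s[i+1]'h) = true) :
    s.foldl pvStep [] = (s.take i ++ s.drop (i+2)).foldl pvStep [] := by
  conv_lhs => rw [pv_decomp s i h]
  rw [List.foldl_append, List.foldl_append,
      pv_cancel_foldl (pv_inv_foldl _ (by simp)) hp]

theorem pv_corA_eq (s : List Char) (i : Nat)
    (hv : ∀ c ∈ s, pvValidChar c = true)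
    (hp : ∀ j (hj : j + 1 < s.length), j < i →
      pvPair (s[j]'(by omega)) (s[j+1]'hj) = false) :
    pvCorrigirPalavra s i = (s.foldl pvStep []).reverse := by
  fun_induction pvCorrigirPalavra s i with
  | case1 s i h hc ih =>
    rw [ih ?hv ?hp, ← pv_elim_mid s i h ?pair]
    case pair =>
      have := pv_cond_eq (hv _ (List.getElem_mem _)) (hv _ (List.getElem_mem _))
        (c := s[i]'(by omega)) (d := s[i+1]'h)
      rw [hc] at this
      simpa using this.symm
    case hv =>
      intro c hcmem
      rcases List.mem_append.mp hcmem with hm | hm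
      · exact hv _ (List.mem_of_mem_take hm)
      · exact hv _ (List.mem_of_mem_drop hm)
    case hp => intro j hj hj0; omega
  | case2 s i h hc1 hc2 ih =>
    rw [ih ?hv ?hp, ← pv_elim_mid s i h ?pair]
    case pair =>
      have := pv_cond_eq (hv _ (List.getElem_mem _)) (hv _ (List.getElem_mem _))
        (c := s[i]'(by omega)) (d := s[i+1]'h)
      rw [Bool.not_eq_true] at hc1
      rw [hc1, hc2] at this
      simpa using this.symm
    case hv =>
      intro c hcmem
      rcases List.mem_append.mp hcmem with hm | hm
      · exact hv _ (List.mem_of_mem_take hm)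
      · exact hv _ (List.mem_of_mem_drop hm)
    case hp => intro j hj hj0; omega
  | case3 s i h hc1 hc2 ih =>
    apply ih hv
    intro j hj hjlt
    rcases Nat.lt_succ_iff_lt_or_eq.mp hjlt with hlt | rfl
    · exact hp j hj hlt
    · have := pv_cond_eq (hv _ (List.getElem_mem _)) (hv _ (List.getElem_mem _))
        (c := s[j]'(by omega)) (d := s[j+1]'hj)
      rw [Bool.not_eq_true] at hc1 hc2
      rw [hc1, hc2] at this
      simpa using this.symm
  | case4 s i h =>
    rw [pv_nf s [] ?ch (by intro t r c l' het _; cases het), List.append_nil,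
        List.reverse_reverse]
    case ch =>
      rw [List.isChain_iff_getElem]
      intro j hj
      exact hp j hj (by omega)

def pvFA (st : List (List Char) × List (List Char)) (w : List Char) :
    List (List Char) × List (List Char) :=
  let p := PySem.List.sorted (PySem.Chars.lower w) (fun c => c) false
  if p ∈ st.2 then
    if PySem.Chars.isIn (PySem.Chars.lower w)
        (PySem.Chars.lower (PySem.Chars.join [' '] st.1)) then
      (st.1 ++ [w], st.2)
    else st
  else (st.1 ++ [w], st.2 ++ [p])

def pvFB (st : List (List Char) × PySem.Set String × List Char) (w : List Char) :
    List (List Char) × PySem.Set String × List Char :=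
  let wl := PySem.Chars.lower w
  let key := String.ofList (PySem.List.sorted wl (fun c => c) false)
  let seen' := if key ∈ st.2.1 then st.2.1 else PySem.Set.add st.2.1 key
  if key ∈ st.2.1 && !(PySem.Chars.isIn wl st.2.2) then st
  else (st.1 ++ [w], seen', if st.1.isEmpty then wl else st.2.2 ++ [' '] ++ wl)

theorem pvDedupA_eq (ws : List (List Char)) : pvDedupA ws = ws.foldl pvFA ([], []) := by
  unfold pvDedupA
  have := PySem.List.foldl_pyRange_pyGetD ws [] pvFA ([], []) (a := 0) (le_refl 0)
  simpa [pvFA] using this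

theorem pvDedupB_eq (ws : List (List Char)) :
    pvDedupB ws = ws.foldl pvFB ([], PySem.Set.ofList [], []) := rfl

theorem pv_ofList_inj : Function.Injective String.ofList := fun a b h => by
  rw [← String.toList_ofList (l := a), h, String.toList_ofList]

theorem pv_join_append (sep w : List Char) (res : List (List Char)) :
    PySem.Chars.join sep (res ++ [w])
      = if res.isEmpty then w else PySem.Chars.join sep res ++ sep ++ w := by
  induction res with
  | nil => simp [PySem.Chars.join_singleton]
  | cons p rest ih =>
    cases rest with
    | nil =>
      simp [PySem.Chars.join_cons_cons, PySem.Chars.join_singleton, List.append_assoc]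
    | cons q r =>
      have h1 : (p :: q :: r) ++ [w] = p :: q :: (r ++ [w]) := by simp
      rw [h1, PySem.Chars.join_cons_cons,
          show q :: (r ++ [w]) = (q :: r) ++ [w] from rfl, ih]
      simp [PySem.Chars.join_cons_cons, List.append_assoc]

theorem pv_dedup_loop (ws : List (List Char)) :
    ∀ (res enc : List (List Char)),
    (ws.foldl pvFA (res, enc)).1
      = (ws.foldl pvFB (res, enc.map String.ofList,
          PySem.Chars.lower (PySem.Chars.join [' '] res))).1 := by
  induction ws with
  | nil => intro res enc; rfl
  | cons w ws ih =>
    intro res enc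
    set p := PySem.List.sorted (PySem.Chars.lower w) (fun c => c) false with hpdef
    have hmem : (String.ofList p ∈ enc.map String.ofList) ↔ (p ∈ enc) :=
      List.mem_map_of_injective pv_ofList_inj
    have hjoin' :
        (if res = [] then PySem.Chars.lower w
         else PySem.Chars.lower (PySem.Chars.join [' '] res) ++ ' ' :: PySem.Chars.lower w)
          = PySem.Chars.lower (PySem.Chars.join [' '] (res ++ [w])) := by
      by_cases hres : res = []
      · subst hres; simp [PySem.Chars.join_singleton]
      · rw [pv_join_append]
        have : res.isEmpty = false := by simpa [List.isEmpty_iff] using hres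
        simp only [this, Bool.false_eq_true, if_false, if_neg hres, PySem.Chars.lower,
          List.map_append, List.append_assoc]
        norm_num
        decide
    simp only [List.foldl_cons]
    by_cases hp : p ∈ enc
    · by_cases hin : PySem.Chars.isIn (PySem.Chars.lower w)
          (PySem.Chars.lower (PySem.Chars.join [' '] res)) = true
      · have ha : pvFA (res, enc) w = (res ++ [w], enc) := by
          simp [pvFA, ← hpdef, hp, hin]
        have hb : pvFB (res, enc.map String.ofList,
              PySem.Chars.lower (PySem.Chars.join [' '] res)) w
            = (res ++ [w], enc.map String.ofList,
               PySem.Chars.lower (PySem.Chars.join [' '] (res ++ [w]))) := by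
          simp [pvFB, ← hpdef, hmem.mpr hp, hin, hjoin']
        rw [ha, hb]; exact ih (res ++ [w]) enc
      · have ha : pvFA (res, enc) w = (res, enc) := by
          simp [pvFA, ← hpdef, hp, hin]
        have hb : pvFB (res, enc.map String.ofList,
              PySem.Chars.lower (PySem.Chars.join [' '] res)) w
            = (res, enc.map String.ofList,
               PySem.Chars.lower (PySem.Chars.join [' '] res)) := by
          simp [pvFB, ← hpdef, hmem.mpr hp, hin]
        rw [ha, hb]; exact ih res enc
    · have hnm : String.ofList p ∉ enc.map String.ofList := fun h => hp (hmem.mp h)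
      have ha : pvFA (res, enc) w = (res ++ [w], enc ++ [p]) := by
        simp [pvFA, ← hpdef, hp]
      have hb : pvFB (res, enc.map String.ofList,
            PySem.Chars.lower (PySem.Chars.join [' '] res)) w
          = (res ++ [w], (enc ++ [p]).map String.ofList,
             PySem.Chars.lower (PySem.Chars.join [' '] (res ++ [w]))) := by
        simp [pvFB, ← hpdef, hnm, hjoin', PySem.Set.add]
      rw [ha, hb]; exact ih (res ++ [w]) (enc ++ [p])

theorem pv_valid_of {c : Char}
    (h : ((97 ≤ c.toNat && c.toNat ≤ 122) || (65 ≤ c.toNat && c.toNat ≤ 90)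
          || c.toNat == 32) = true) : pvValidChar c = true := by
  rw [pv_valid_iff]
  simp at h
  tauto


-- ===== VERDICT (by name: the statement is the Claim_ definition above) =====
theorem corrigir_doc_spec : Claim_equal_corrigir_doc := by
  intro s _ hpre
  show corrigir_doc s = corrigir_doc_alt s
  have hvc : ∀ c ∈ s.toList, pvValidChar c = true := fun c hc =>
    pv_valid_of (List.all_eq_true.mp hpre.2 c hc)
  have hguard : (0 < s.toList.length && s.toList.all pvValidChar) = true := by
    simp only [Bool.and_eq_true, decide_eq_true_eq, List.all_eq_true]
    refine ⟨List.length_pos_iff.mpr hpre.1, hvc⟩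
  unfold corrigir_doc corrigir_doc_alt
  simp only [hguard, if_true]
  rw [pv_corA_eq s.toList 0 hvc (fun j hj h0 => absurd h0 (Nat.not_lt_zero j))]
  congr 2
  rw [pvDedupA_eq, pvDedupB_eq]
  have := pv_dedup_loop (PySem.Chars.split₀ (s.toList.foldl pvStep []).reverse) [] []
  simpa using this
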